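-- pv_equiv track=rewrite | github.com/MrBrantCode/unitest_baseline | mut_generate/mist_train_cf/cf_45786/solution.py | get_even_prime_and_merge
-- ===== SOURCE A (Python) =====
-- def get_even_prime_and_merge(l1: list, l2: list):
--     """Return only even prime numbers from both lists, merged and sorted in descending order."""
--
--     def merge_and_sort(m: list, n: list):
--         result = m + n
--         result.sort(reverse=True)
--         return result
--
--     def is_prime(x: int):
--         if x <= 1 or x % 2 == 0:
--             return x == 2     # return False
--         sqr = int(x**0.5) + 1
--         for divisor in range(3, sqr, 2):
--             if x % divisor == 0:
--                 return False
--         return True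
--
--     even_prime_numbers = []
--     for num in merge_and_sort(l1, l2):
--         if num > 1 and num % 2 == 0 and is_prime(num):
--             even_prime_numbers.append(num)
--
--     return even_prime_numbers
-- ===== SOURCE B (Python) =====
-- def get_even_prime_and_merge(l1: list, l2: list):
--     """Return only even prime numbers from both lists, merged and sorted in descending order."""
--     # The only even prime is 2, so the answer is just that many 2s.
--     return [2] * (l1.count(2) + l2.count(2))
-- ===== Notes on version B (the rewrite author's own statement) =====
-- stated objective: faster
-- what changed: The only even prime is 2, so B just counts the 2s in both lists and returns [2]*count, replacing A's sort-then-filter-with-primality-test.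
import Mathlib
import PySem

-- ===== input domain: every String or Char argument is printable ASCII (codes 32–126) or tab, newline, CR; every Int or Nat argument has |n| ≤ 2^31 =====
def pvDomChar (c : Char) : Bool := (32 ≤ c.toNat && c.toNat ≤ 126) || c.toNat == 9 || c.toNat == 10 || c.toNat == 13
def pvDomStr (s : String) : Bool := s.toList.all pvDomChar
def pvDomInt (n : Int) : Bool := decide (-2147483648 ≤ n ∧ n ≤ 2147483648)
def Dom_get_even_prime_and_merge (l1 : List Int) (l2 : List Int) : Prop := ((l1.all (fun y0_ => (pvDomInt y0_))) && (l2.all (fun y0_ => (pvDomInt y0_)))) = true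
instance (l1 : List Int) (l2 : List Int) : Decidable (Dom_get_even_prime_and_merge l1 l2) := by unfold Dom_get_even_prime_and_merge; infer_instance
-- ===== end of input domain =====

-- B replaces A's sort-then-filter (with a primality test) by counting the 2s: the only even prime is 2.

-- ===== PORT A =====
-- helper merge_and_sort: result = m + n; result.sort(reverse=True)
def pvMergeAndSort (m : List Int) (n : List Int) : List Int :=
  PySem.List.sorted (m ++ n) (fun x => x) true

-- helper is_prime. In this program it is only ever called on even numbers
-- (guard 'num % 2 == 0' precedes the call), so only the first branch is
-- reachable; the trial-division branch is ported with Int.sqrt in place of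
-- Python's int(x**0.5) (exact on the reachable inputs: the branch never runs here).
def pvIsPrime (x : Int) : Bool :=
  if x ≤ 1 ∨ PySem.Int.mod x 2 = 0 then x == 2
  else
    let sqr := Int.sqrt x + 1
    (PySem.List.pyRange 3 sqr 2).all (fun d => !(PySem.Int.mod x d == 0))

def get_even_prime_and_merge (l1 : List Int) (l2 : List Int) : List Int :=
  (pvMergeAndSort l1 l2).foldl
    (fun acc num =>
      if decide (num > 1) && (PySem.Int.mod num 2 == 0) && pvIsPrime num
      then acc ++ [num] else acc) []

-- ===== PORT B =====
def get_even_prime_and_merge_alt (l1 : List Int) (l2 : List Int) : List Int :=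
  PySem.List.pyRepeat [(2 : Int)] ((PySem.List.count l1 2 : Int) + (PySem.List.count l2 2 : Int))

-- ===== PRECONDITION & SPEC =====
def Spec_get_even_prime_and_merge (l1 : List Int) (l2 : List Int) (out : List Int) : Prop := out = get_even_prime_and_merge_alt l1 l2
instance (l1 : List Int) (l2 : List Int) (out : List Int) : Decidable (Spec_get_even_prime_and_merge l1 l2 out) := by unfold Spec_get_even_prime_and_merge; infer_instance

-- ===== CLAIM (what is proved, stated in full; the proofs are below) =====
def Claim_equal_get_even_prime_and_merge : Prop := ∀ (l1 : List Int) (l2 : List Int), Dom_get_even_prime_and_merge l1 l2 → Spec_get_even_prime_and_merge l1 l2 (get_even_prime_and_merge l1 l2)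

-- ===== LEMMAS AND PROOFS =====

-- A's loop test is exactly 'num == 2': an even number > 1 hits is_prime's first
-- branch, which returns (x == 2).
theorem pv_test_eq_two (n : Int) :
    (decide (n > 1) && (PySem.Int.mod n 2 == 0) && pvIsPrime n) = (n == 2) := by
  simp only [pvIsPrime, PySem.Int.mod]
  by_cases h2 : n.fmod 2 = 0
  · simp [h2]
    omega
  · have hb : (n.fmod 2 == 0) = false := by simpa using h2
    simp [hb]
    rintro rfl
    exact h2 (by decide)

-- ===== VERDICT (by name: the statement is the Claim_ definition above) =====
theorem get_even_prime_and_merge_spec : Claim_equal_get_even_prime_and_merge := by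
  intro l1 l2 _
  show _ = _
  unfold get_even_prime_and_merge get_even_prime_and_merge_alt
  have hperm := PySem.List.sorted_perm (l1 ++ l2) (fun x => x) true
  calc (pvMergeAndSort l1 l2).foldl
        (fun acc num =>
          if decide (num > 1) && (PySem.Int.mod num 2 == 0) && pvIsPrime num
          then acc ++ [num] else acc) []
      = (pvMergeAndSort l1 l2).filter (fun num => num == 2) := by
        simp only [pv_test_eq_two]
        exact PySem.List.foldl_append_if_eq_filter _ _ []
    _ = List.replicate (List.count 2 (pvMergeAndSort l1 l2)) 2 := List.filter_beq 2
    _ = PySem.List.pyRepeat [(2 : Int)] ((PySem.List.count l1 2 : Int) + (PySem.List.count l2 2 : Int)) := by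
        rw [PySem.List.pyRepeat_singleton]
        congr 1
        rw [pvMergeAndSort, hperm.count_eq, List.count_append,
          PySem.List.count_eq, PySem.List.count_eq]
        omega
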